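-- pv_equiv track=rewrite | github.com/abakedjoetato/Efk2.3 | bot/utils/embed_factory.py | get_mission_level
-- ===== SOURCE A (Python) =====
-- def get_mission_level(mission_id: str) -> int:
--     """Determine mission difficulty level"""
--     if any(x in mission_id.lower() for x in ['airport', 'military', 'bunker']):
--         return 4  # High difficulty
--     elif any(x in mission_id.lower() for x in ['industrial', 'chemical', 'kamensk']):
--         return 3  # Medium-high difficulty
--     elif any(x in mission_id.lower() for x in ['settlement', 'sawmill']):
--         return 2  # Medium difficulty
--     else:
--         return 1  # Low difficulty
-- ===== SOURCE B (Python) =====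
-- def get_mission_level(mission_id: str) -> int:
--     """Determine mission difficulty level"""
--     low = mission_id.lower()
--     levels = {4: ['airport', 'military', 'bunker'],
--               3: ['industrial', 'chemical', 'kamensk'],
--               2: ['settlement', 'sawmill']}
--     matched = [lvl for lvl, kws in levels.items() if any(k in low for k in kws)]
--     return max(matched, default=1)
-- ===== Notes on version B (the rewrite author's own statement) =====
-- stated objective: idiomatic
-- what changed: Replaced the if/elif priority cascade (lowercasing the id anew in each branch) with a keyword table, one lowercase call, a comprehension collecting all matching levels and max(..., default=1); equivalent because the cascade's descending order already returns the highest matching level.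
import Mathlib
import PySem

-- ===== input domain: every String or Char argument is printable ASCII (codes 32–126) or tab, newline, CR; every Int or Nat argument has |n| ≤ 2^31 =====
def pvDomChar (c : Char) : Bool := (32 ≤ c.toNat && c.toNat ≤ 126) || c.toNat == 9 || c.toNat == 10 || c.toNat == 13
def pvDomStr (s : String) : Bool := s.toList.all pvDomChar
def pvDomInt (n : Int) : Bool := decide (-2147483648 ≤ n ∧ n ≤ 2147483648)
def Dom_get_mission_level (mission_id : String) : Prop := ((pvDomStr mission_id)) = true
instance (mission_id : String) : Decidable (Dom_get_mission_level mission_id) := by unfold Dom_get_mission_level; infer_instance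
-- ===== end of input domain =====

-- B replaces A's if/elif cascade with a keyword table, a single lowercase call and max-of-all-matching-levels (idiomatic; same cost).

-- ===== PORT A =====
def get_mission_level (mission_id : String) : Int :=
  if (["airport", "military", "bunker"] : List String).any
      (fun x => PySem.Str.isIn x (PySem.Str.lower mission_id)) then 4
  else if (["industrial", "chemical", "kamensk"] : List String).any
      (fun x => PySem.Str.isIn x (PySem.Str.lower mission_id)) then 3
  else if (["settlement", "sawmill"] : List String).any
      (fun x => PySem.Str.isIn x (PySem.Str.lower mission_id)) then 2
  else 1

-- ===== PORT B =====
def get_mission_level_alt (mission_id : String) : Int :=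
  let low := PySem.Str.lower mission_id
  let levels : List (Int × List String) :=
    [(4, ["airport", "military", "bunker"]),
     (3, ["industrial", "chemical", "kamensk"]),
     (2, ["settlement", "sawmill"])]
  let matched := (levels.filter (fun p => p.2.any (fun k => PySem.Str.isIn k low))).map Prod.fst
  matched.foldl max 1

-- ===== PRECONDITION & SPEC =====
def Spec_get_mission_level (mission_id : String) (out : Int) : Prop := out = get_mission_level_alt mission_id
instance (mission_id : String) (out : Int) : Decidable (Spec_get_mission_level mission_id out) := by unfold Spec_get_mission_level; infer_instance

-- ===== CLAIM (what is proved, stated in full; the proofs are below) =====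
def Claim_equal_get_mission_level : Prop := ∀ (mission_id : String), Dom_get_mission_level mission_id → Spec_get_mission_level mission_id (get_mission_level mission_id)

-- ===== LEMMAS AND PROOFS =====

-- ===== VERDICT (by name: the statement is the Claim_ definition above) =====
theorem get_mission_level_spec : Claim_equal_get_mission_level := by
  intro s _
  unfold Spec_get_mission_level get_mission_level get_mission_level_alt
  cases h4 : (["airport", "military", "bunker"] : List String).any
      (fun x => PySem.Str.isIn x (PySem.Str.lower s)) <;>
  cases h3 : (["industrial", "chemical", "kamensk"] : List String).any
      (fun x => PySem.Str.isIn x (PySem.Str.lower s)) <;>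
  cases h2 : (["settlement", "sawmill"] : List String).any
      (fun x => PySem.Str.isIn x (PySem.Str.lower s)) <;>
  all_goals simp only [List.filter_cons, List.filter_nil, h4, h3, h2, List.map,
      List.foldl, if_true]
  all_goals decide
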